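-- pv_equiv track=rewrite | github.com/dudamarlena/pyc_source | pycfiles/cpipe-0.0.1.tar/PpTokeniser.py | _sliceHexadecimalLiteral
-- ===== SOURCE A (Python) =====
-- CHAR_SET_MAP = {'lex.charset': {'source character set': set('abcdefghijklmnopqrstuvwxyzABCDEFGHIJKLMNOPQRSTUVWXYZ0123456789_{}[]#()<>%:;.?*+-/^&|~!=,\\"\'\t\x0b\x0c\n '),
--                    'ucn ordinals': set((36, 64, 96))},
--    'lex.ppnumber': {'digit': set('0123456789'),
--                     'nonzero-digit': set('123456789'),
--                     'octal-digit': set('01234567'),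
--                     'hexadecimal-digit': set('0123456789abcdefABCDEF')},
--    'lex.header': {'h-char_omit': set('\n>'),
--                   'q-char_omit': set('\n"'),
--                   'undefined_h_words': set(("'", '\\', '"', '//', '/*')),
--                   'undefined_q_words': set(("'", '\\', '/*', '//'))},
--    'lex.name': {'part_non_digit': set(('_', 'a', 'b', 'c', 'd', 'e', 'f', 'g', 'h', 'i', 'j', 'k', 'l', 'm', 'n', 'o',
--      'p', 'q', 'r', 's', 't', 'u', 'v', 'w', 'x', 'y', 'z', 'A', 'B', 'C', 'D', 'E',
--      'F', 'G', 'H', 'I', 'J', 'K', 'L', 'M', 'N', 'O', 'P', 'Q', 'R', 'S', 'T', 'U',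
--      'V', 'W', 'X', 'Y', 'Z', '$', '@', '`'))},
--    'lex.key': {'keywords': set(('asm', 'do', 'if', 'return', 'typedef', 'auto', 'double', 'inline', 'short', 'typeid',
--      'bool', 'dynamic_cast', 'int', 'signed', 'typename', 'break', 'else', 'long',
--      'sizeof', 'union', 'case', 'enum', 'mutable', 'static', 'unsigned', 'catch',
--      'explicit', 'namespace', 'static_cast', 'using', 'char', 'export', 'new', 'struct',
--      'virtual', 'class', 'extern', 'operator', 'switch', 'void', 'const', 'false',
--      'private', 'template', 'volatile', 'const_cast', 'float', 'protected', 'this',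
--      'wchar_t', 'continue', 'for', 'public', 'throw', 'while', 'default', 'friend',
--      'register', 'true', 'delete', 'goto', 'reinterpret_cast', 'try'))},
--    'lex.op': {'operators': set(('{', '}', '[', ']', '#', '##', '(', ')', '<:', ':>', '<%', '%>', '%:', '%:%:',
--      ';', ':', '...', 'new', 'delete', '?', '::', '.', '.*', '+', '-', '*', '/',
--      '%', '^', '&', '|', '~', '!', '=', '<', '>', '+=', '-=', '*=', '/=', '%=', '^=',
--      '&=', '|=', '<<', '>>', '>>=', '<<=', '==', '!=', '<=', '>=', '&&', '||', '++',
--      '--', ',', '->*', '->', 'and', 'and_eq', 'bitand', 'bitor', 'compl', 'not',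
--      'not_eq', 'or', 'or_eq', 'xor', 'xor_eq'))},
--    'lex.icon': {'unsigned-suffix': set('uU'),
--                 'long-suffix': set('lL')},
--    'lex.ccon': {'simple-escape-sequence': set('\'"?\\abfnrtv'),
--                 'c-con_omit': set("'\\\n")},
--    'lex.fcon': {'floating-suffix': set('flFL'),
--                 'sign': set('-+'),
--                 'exponent_prefix': set('eE')},
--    'lex.string': {'s-char_omit': set('"\\\n')},
--    'lex.bool': {'set': set(('false', 'true'))},
--    'cpp': {'lparen': '(',
--            'new-line': '\n'}}
--
-- def _sliceHexadecimalLiteral(theBuf, theOfs=0):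
--     """ISO/IEC 14882:1998(E) 2.13.1 Integer literals [lex.icon] - hexadecimal-literal."""
--     i = theOfs
--     try:
--         if theBuf[i] == '0' and theBuf[(i + 1)] in ('x', 'X'):
--             i += 2
--         else:
--             return 0
--         while theBuf[i] in CHAR_SET_MAP['lex.ppnumber']['hexadecimal-digit']:
--             i += 1
--
--     except IndexError:
--         pass
--
--     i -= theOfs
--     if i > 2:
--         return i
--     return 0
-- ===== SOURCE B (Python) =====
-- HEX_DIGITS = '0123456789abcdefABCDEF'
--
-- def _sliceHexadecimalLiteral(theBuf, theOfs=0):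
--     """ISO/IEC 14882:1998(E) 2.13.1 Integer literals [lex.icon] - hexadecimal-literal."""
--     s = theBuf[theOfs:]
--     if not (s.startswith('0x') or s.startswith('0X')):
--         return 0
--     rest = s[2:]
--     ndigits = len(rest) - len(rest.lstrip(HEX_DIGITS))
--     if ndigits > 0:
--         return 2 + ndigits
--     return 0
-- ===== Notes on version B (the rewrite author's own statement) =====
-- stated objective: idiomatic
-- what changed: Replaces the element-by-element index walk guarded by a try/except IndexError with slicing: take theBuf[theOfs:], test the '0x'/'0X' prefix with startswith, and measure the hex-digit run as the length difference before/after lstrip(HEX_DIGITS) - no explicit loop, no exception handling.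
-- outside the precondition, e.g. on _sliceHexadecimalLiteral('0x1', -100): A returns 0, B returns 3; on _sliceHexadecimalLiteral('0x1f', -4): A returns 5, B returns 4
import Mathlib
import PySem

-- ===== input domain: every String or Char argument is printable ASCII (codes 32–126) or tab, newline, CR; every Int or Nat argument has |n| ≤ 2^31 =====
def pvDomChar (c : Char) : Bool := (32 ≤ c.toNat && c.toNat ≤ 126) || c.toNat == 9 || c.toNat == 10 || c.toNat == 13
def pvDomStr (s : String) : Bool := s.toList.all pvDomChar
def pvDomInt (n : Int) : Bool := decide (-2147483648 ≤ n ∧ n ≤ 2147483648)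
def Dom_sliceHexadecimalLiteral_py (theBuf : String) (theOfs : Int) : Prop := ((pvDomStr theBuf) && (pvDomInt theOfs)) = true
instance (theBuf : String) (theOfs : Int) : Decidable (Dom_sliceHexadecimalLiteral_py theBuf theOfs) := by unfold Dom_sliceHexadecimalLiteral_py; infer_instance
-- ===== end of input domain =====

-- B replaces A's index walk + try/except with slicing, startswith and an lstrip length difference (idiomatic, same cost); Pre_ restricts to non-negative offsets (A's negative-index wraparound is outside the tokenizer's natural domain).


-- CHAR_SET_MAP['lex.ppnumber']['hexadecimal-digit'] in A / HEX_DIGITS in B (same constant set)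
def pvHexChars : List Char := "0123456789abcdefABCDEF".toList

-- ===== PORT A =====
-- the 'while theBuf[i] in hex-digits: i += 1' loop; an IndexError (pyGet? = none) exits
-- the loop exactly like the 'except IndexError: pass' handler, so both give the final i
def pvScanA (s : String) (i : Int) : Int :=
  match h : PySem.Str.pyGet? s i with
  | none => i
  | some c => if pvHexChars.contains c then pvScanA s (i + 1) else i
termination_by (s.toList.length - i).toNat
decreasing_by
  have h' : PySem.List.pyGet? s.toList i = some c := by simpa using h
  have hr : PySem.Raise.InRange s.toList.length i := by
    by_contra hc
    rw [← PySem.List.pyGet?_eq_none_iff] at hc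
    simp [h'] at hc
  rw [PySem.Raise.InRange] at hr
  omega

def sliceHexadecimalLiteral_py (theBuf : String) (theOfs : Int) : Int :=
  -- i = theOfs; try: if theBuf[i]=='0' and theBuf[i+1] in ('x','X') … ; an IndexError
  -- before i += 2 leaves i = theOfs, so after 'i -= theOfs' the result is 0
  match PySem.Str.pyGet? theBuf theOfs with
  | none => 0
  | some c =>
    if c = '0' then
      match PySem.Str.pyGet? theBuf (theOfs + 1) with
      | none => 0
      | some c2 =>
        if c2 = 'x' ∨ c2 = 'X' then
          let i := pvScanA theBuf (theOfs + 2)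
          let r := i - theOfs
          if r > 2 then r else 0
        else 0
    else 0

-- ===== PORT B =====
def sliceHexadecimalLiteral_py_alt (theBuf : String) (theOfs : Int) : Int :=
  let s := PySem.Str.slice theBuf (some theOfs) none
  if !(PySem.Str.startswith s "0x" || PySem.Str.startswith s "0X") then 0
  else
    let rest := PySem.Str.slice s (some 2) none
    -- rest.lstrip(HEX_DIGITS) drops the leading chars belonging to the set: exactly dropWhile
    let ndigits : Int := PySem.Str.len rest - ((rest.toList.dropWhile (fun c => pvHexChars.contains c)).length : Int)
    if ndigits > 0 then 2 + ndigits else 0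

-- ===== PRECONDITION & SPEC =====
-- Pre_ excludes negative offsets, on which A still returns a value via Python's negative-index
-- wraparound (reading from the end of the buffer and onwards past index -1 back from the start) —
-- outside the tokenizer's natural domain of forward offsets; B slices from the end there.
def Pre_sliceHexadecimalLiteral_py (theBuf : String) (theOfs : Int) : Prop := 0 ≤ theOfs
instance (theBuf : String) (theOfs : Int) : Decidable (Pre_sliceHexadecimalLiteral_py theBuf theOfs) := by unfold Pre_sliceHexadecimalLiteral_py; infer_instance

def pvWitness_sliceHexadecimalLiteral_py : String × Int := ("0x1f", 0)

def Spec_sliceHexadecimalLiteral_py (theBuf : String) (theOfs : Int) (out : Int) : Prop := out = sliceHexadecimalLiteral_py_alt theBuf theOfs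
instance (theBuf : String) (theOfs : Int) (out : Int) : Decidable (Spec_sliceHexadecimalLiteral_py theBuf theOfs out) := by unfold Spec_sliceHexadecimalLiteral_py; infer_instance

-- ===== CLAIM (what is proved, stated in full; the proofs are below) =====
def Claim_equal_sliceHexadecimalLiteral_py : Prop := ∀ (theBuf : String) (theOfs : Int), Dom_sliceHexadecimalLiteral_py theBuf theOfs → Pre_sliceHexadecimalLiteral_py theBuf theOfs → Spec_sliceHexadecimalLiteral_py theBuf theOfs (sliceHexadecimalLiteral_py theBuf theOfs)

-- ===== LEMMAS AND PROOFS =====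

-- the scan loop, started at a non-negative index k, stops after the maximal hex-digit run of drop k
lemma pvScanA_eq (s : String) (k : Nat) :
    pvScanA s (k : Int) =
      (k : Int) + ((s.toList.drop k).takeWhile (fun c => pvHexChars.contains c)).length := by
  suffices H : ∀ n k, s.toList.length - k ≤ n → pvScanA s (k : Int) =
      (k : Int) + ((s.toList.drop k).takeWhile (fun c => pvHexChars.contains c)).length from
    H _ k le_rfl
  intro n
  induction n with
  | zero =>
    intro k hk
    have hle : s.toList.length ≤ k := by omega
    rw [pvScanA]
    split
    · simp [List.drop_eq_nil_of_le hle]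
    · next c h =>
      rw [PySem.Str.pyGet?_natCast, List.getElem?_eq_none hle] at h
      exact absurd h (by simp)
  | succ n IH =>
    intro k hk
    rw [pvScanA]
    split
    · next h =>
      rw [PySem.Str.pyGet?_natCast, List.getElem?_eq_none_iff] at h
      simp [List.drop_eq_nil_of_le h]
    · next c h =>
      rw [PySem.Str.pyGet?_natCast] at h
      obtain ⟨hklt, hck⟩ := List.getElem?_eq_some_iff.mp h
      have hdrop : s.toList.drop k = c :: s.toList.drop (k + 1) := by
        rw [← hck]; exact (List.getElem_cons_drop hklt).symm
      rw [hdrop, List.takeWhile_cons]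
      by_cases hhex : pvHexChars.contains c = true
      · have hcast : (k : Int) + 1 = ((k + 1 : Nat) : Int) := by push_cast; ring
        rw [if_pos hhex, hcast, IH (k + 1) (by omega)]
        have hmem : c ∈ pvHexChars := by simpa using hhex
        simp [hmem]
        ring
      · have hmem : c ∉ pvHexChars := by simpa using hhex
        simp [hmem]

-- ===== VERDICT (by name: the statement is the Claim_ definition above) =====
-- the two ports agree once everything is pushed down to buf.toList.drop o
lemma pv_key (buf : String) (o : Nat) :
    sliceHexadecimalLiteral_py buf (o : Int) = sliceHexadecimalLiteral_py_alt buf (o : Int) := by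
  have h0 : PySem.Str.pyGet? buf (o : Int) = (buf.toList.drop o)[0]? := by
    simp [List.getElem?_drop]
  have h1 : PySem.Str.pyGet? buf ((o : Int) + 1) = (buf.toList.drop o)[1]? := by
    have hc : ((o : Int) + 1) = ((o + 1 : Nat) : Int) := by push_cast; ring
    rw [hc, PySem.Str.pyGet?_natCast, List.getElem?_drop]
  have h2 : pvScanA buf ((o : Int) + 2) =
      ((o : Int) + 2) + (((buf.toList.drop o).drop 2).takeWhile (fun c => pvHexChars.contains c)).length := by
    have hc : ((o : Int) + 2) = ((o + 2 : Nat) : Int) := by push_cast; ring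
    have hdd : buf.toList.drop (o + 2) = (buf.toList.drop o).drop 2 := by
      rw [List.drop_drop, Nat.add_comm]
    rw [hc, pvScanA_eq, hdd]
  have hs : (PySem.Str.slice buf (some (o : Int)) none).toList = buf.toList.drop o := by
    simp [PySem.List.slice_from_natCast]
  rw [sliceHexadecimalLiteral_py, sliceHexadecimalLiteral_py_alt, h0, h1]
  rcases hm : buf.toList.drop o with _ | ⟨a, _ | ⟨b, t⟩⟩
  · -- empty tail: A sees an IndexError at once, B's slice is empty
    rw [hm] at hs
    simp [PySem.Str.startswith_eq, hs]
  · -- one char: A fails on theBuf[theOfs+1] or the '0' test, B's startswith is false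
    rw [hm] at hs
    by_cases ha : a = '0' <;>
      simp [PySem.Str.startswith_eq, hs, ha]
  · -- two or more chars
    rw [hm] at h2 hs
    simp only [List.getElem?_cons_zero, List.getElem?_cons_succ]
    by_cases ha : a = '0'
    · by_cases hb : b = 'x' ∨ b = 'X'
      · -- hex prefix accepted by both; compare the digit-run arithmetic
        have hrest : (PySem.Str.slice (PySem.Str.slice buf (some (o : Int)) none) (some 2) none).toList
            = t := by
          have h2' : (PySem.List.slice (a :: b :: t) (some 2) none) = t := by
            simp [pysem]
          simp [hs, h2']
        have hsw : (PySem.Str.startswith (PySem.Str.slice buf (some (o : Int)) none) "0x"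
              || PySem.Str.startswith (PySem.Str.slice buf (some (o : Int)) none) "0X") = true := by
          rcases hb with hb | hb <;>
            simp [PySem.Str.startswith_eq, hs, ha, hb, PySem.Chars.startswith_iff, List.cons_prefix_cons]
        have hTD : (t.takeWhile (fun c => pvHexChars.contains c)).length
            + (t.dropWhile (fun c => pvHexChars.contains c)).length = t.length := by
          rw [← List.length_append, List.takeWhile_append_dropWhile]
        have hlen : PySem.Str.len (PySem.Str.slice (PySem.Str.slice buf (some (o : Int)) none) (some 2) none)
            = (t.length : Int) := by
          rw [PySem.Str.len_eq, hrest]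
        rw [if_pos ha, if_pos hb, hsw]
        simp only [Bool.not_true, Bool.false_eq_true, if_false, h2, hlen, hrest]
        simp only [List.drop_succ_cons, List.drop_zero]
        split_ifs <;> simp_all <;> omega
      · -- second char is not x/X: both return 0
        rw [not_or] at hb
        have hbx : ¬ ('x' = b) := fun h => hb.1 h.symm
        have hbX : ¬ ('X' = b) := fun h => hb.2 h.symm
        simp [PySem.Str.startswith_eq, hs, ha, hb.1, hb.2, hbx, hbX, PySem.Chars.startswith_iff,
          List.cons_prefix_cons]
    · have ha' : ¬ ('0' = a) := fun h => ha h.symm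
      simp [PySem.Str.startswith_eq, hs, ha, ha', PySem.Chars.startswith_iff, List.cons_prefix_cons]

theorem sliceHexadecimalLiteral_py_spec : Claim_equal_sliceHexadecimalLiteral_py := by
  intro theBuf theOfs _hdom hpre
  obtain ⟨o, rfl⟩ := Int.eq_ofNat_of_zero_le hpre
  exact pv_key theBuf o
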